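-- pv_equiv track=rewrite | github.com/Janek7734/prg-basics | 04-Functions/7-28.py | f
-- ===== SOURCE A (Python) =====
-- def f(dice):
--     longest_digit = dice[0]
--     longest_count = 1
--     current_digit = dice[0]
--     current_count = 1
--
--     for i in dice[1:]:
--         if  i == current_digit:
--             current_count += 1
--         else:
--             if current_count > longest_count:
--                 longest_count = current_count
--                 longest_digit = current_digit
--             current_digit = i
--             current_count = 1
--
--     if current_count > longest_count:
--         longest_digit = current_digit
--
--     return int(longest_digit)
-- ===== SOURCE B (Python) =====
-- def _runs(dice):
--     # run-length encode: list of (value, run_length) in order;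
--     # for each run starting at i, advance j past all equal elements, emit, continue at j
--     runs = []
--     i = 0
--     n = len(dice)
--     while i < n:
--         j = i
--         while j < n and dice[j] == dice[i]:
--             j += 1
--         runs.append((dice[i], j - i))
--         i = j
--     return runs
--
--
-- def f(dice):
--     return int(max(_runs(dice), key=lambda r: r[1])[0])
-- ===== Notes on version B (the rewrite author's own statement) =====
-- stated objective: simpler
-- what changed: Replaces A's single-pass four-variable state machine (longest/current digit+count with an end-of-loop fixup) by run-length encoding the list into (value, length) runs and returning the first run of maximal length via max(key=...).
import Mathlib
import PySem

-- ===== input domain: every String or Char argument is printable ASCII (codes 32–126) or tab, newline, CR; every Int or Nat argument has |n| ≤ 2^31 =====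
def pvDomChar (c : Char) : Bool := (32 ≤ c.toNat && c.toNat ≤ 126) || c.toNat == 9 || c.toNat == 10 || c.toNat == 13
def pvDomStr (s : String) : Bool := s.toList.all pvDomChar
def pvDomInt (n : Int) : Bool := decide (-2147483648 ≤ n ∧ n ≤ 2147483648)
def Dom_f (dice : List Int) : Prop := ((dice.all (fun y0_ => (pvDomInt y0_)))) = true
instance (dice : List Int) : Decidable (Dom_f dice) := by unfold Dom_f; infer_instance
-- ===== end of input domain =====

-- B is a different decomposition (run-length encode, then pick the first longest run); objective: simpler, not faster.

-- ===== PORT A =====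
-- state = (longest_digit, longest_count, current_digit, current_count)
def stepA (s : Int × Int × Int × Int) (i : Int) : Int × Int × Int × Int :=
  if i == s.2.2.1 then (s.1, s.2.1, s.2.2.1, s.2.2.2 + 1)
  else if s.2.2.2 > s.2.1 then (s.2.2.1, s.2.2.2, i, 1)
  else (s.1, s.2.1, i, 1)

def f (dice : List Int) : Int :=
  match dice with
  | [] => 0  -- dice[0] raises IndexError in Python; excluded by Pre_f
  | d0 :: rest =>
    let s := rest.foldl stepA (d0, 1, d0, 1)
    if s.2.2.2 > s.2.1 then s.2.2.1 else s.1

-- ===== PORT B =====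
-- _runs: count the prefix of elements equal to the head (the while loop over k),
-- emit (head, k), recurse on dice[k:]; takeWhile/dropWhile are that count and slice.
def pyRuns : List Int → List (Int × Int)
  | [] => []
  | x :: xs =>
    (x, ((xs.takeWhile (fun y => y == x)).length : Int) + 1) ::
      pyRuns (xs.dropWhile (fun y => y == x))
termination_by l => l.length
decreasing_by
  simp only [List.length_cons]
  exact Nat.lt_succ_of_le (List.length_dropWhile_le _ _)

-- max(_, key=lambda r: r[1]): first maximal element (replace only on strictly greater)
def pickMax (b : Int × Int) : List (Int × Int) → Int × Int
  | [] => b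
  | r :: rs => pickMax (if r.2 > b.2 then r else b) rs

def f_alt (dice : List Int) : Int :=
  match pyRuns dice with
  | [] => 0  -- max of an empty sequence raises ValueError in Python; excluded by Pre_f
  | r :: rs => (pickMax r rs).1

-- ===== PRECONDITION & SPEC =====
-- Pre_f excludes the empty list, on which A raises IndexError (and B raises ValueError).
def Pre_f (dice : List Int) : Prop := dice ≠ []
instance (dice : List Int) : Decidable (Pre_f dice) := by unfold Pre_f; infer_instance
def pvWitness_f : List Int := [3, 3, 1, 2, 2, 2]
def Spec_f (dice : List Int) (out : Int) : Prop := out = f_alt dice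
instance (dice : List Int) (out : Int) : Decidable (Spec_f dice out) := by unfold Spec_f; infer_instance

-- ===== CLAIM (what is proved, stated in full; the proofs are below) =====
def Claim_equal_f : Prop := ∀ (dice : List Int), Dom_f dice → Pre_f dice → Spec_f dice (f dice)

-- ===== LEMMAS AND PROOFS =====

-- absorbing a block of elements equal to the current digit just adds to current_count
lemma foldA_absorb (pre rest : List Int) (ld lc cd cc : Int)
    (h : ∀ y ∈ pre, (y == cd) = true) :
    (pre ++ rest).foldl stepA (ld, lc, cd, cc)
      = rest.foldl stepA (ld, lc, cd, cc + pre.length) := by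
  induction pre generalizing cc with
  | nil => simp
  | cons p ps ih =>
    have hp : (p == cd) = true := h p (by simp)
    simp only [List.cons_append, List.foldl_cons, stepA, hp, if_pos]
    rw [ih _ (fun y hy => h y (by simp [hy]))]
    have harith : cc + 1 + (ps.length : Int) = cc + ((p :: ps).length : Int) := by
      simp only [List.length_cons]; push_cast; ring
    rw [harith]

lemma pyRuns_cons (x : Int) (xs : List Int) :
    pyRuns (x :: xs)
      = (x, ((xs.takeWhile (fun y => y == x)).length : Int) + 1) ::
          pyRuns (xs.dropWhile (fun y => y == x)) := by
  rw [pyRuns]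

-- main invariant: finishing A's loop from any state equals picking the longest run
-- among (longest so far) followed by the current run (extended by the rest) and the
-- remaining runs of the input.
lemma loopA_spec : ∀ (n : ℕ) (zs : List Int), zs.length ≤ n → ∀ (ld lc cd cc : Int),
    (let s := zs.foldl stepA (ld, lc, cd, cc)
     if s.2.2.2 > s.2.1 then s.2.2.1 else s.1)
      = (pickMax (ld, lc)
          ((cd, cc + ((zs.takeWhile (fun y => y == cd)).length : Int)) ::
            pyRuns (zs.dropWhile (fun y => y == cd)))).1 := by
  intro n
  induction n with
  | zero =>
    intro zs hzs ld lc cd cc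
    have : zs = [] := List.length_eq_zero_iff.mp (Nat.le_zero.mp hzs)
    subst this
    simp only [List.length_nil, List.foldl_nil, List.takeWhile_nil, List.dropWhile_nil,
      Nat.cast_zero, add_zero, pyRuns, pickMax]
    split_ifs <;> rfl
  | succ n ih =>
    intro zs hzs ld lc cd cc
    have hsplit : zs.takeWhile (fun y => y == cd) ++ zs.dropWhile (fun y => y == cd) = zs :=
      List.takeWhile_append_dropWhile
    have habs := foldA_absorb (zs.takeWhile (fun y => y == cd))
      (zs.dropWhile (fun y => y == cd)) ld lc cd cc
      (fun y hy => by
        simpa using List.mem_takeWhile_imp (p := fun y => y == cd) hy)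
    rw [hsplit] at habs
    cases hdrop : zs.dropWhile (fun y => y == cd) with
    | nil =>
      rw [hdrop] at habs
      simp only [habs, List.foldl_nil, pyRuns, pickMax]
      split_ifs with h1 <;> simp_all
    | cons y ys =>
      have hy : (y == cd) = false := by
        have := List.dropWhile_get_zero_not (p := fun y => y == cd) (l := zs)
          (by rw [hdrop]; simp)
        simpa [hdrop] using this
      rw [hdrop] at habs
      -- length bookkeeping for the IH
      have hlen : ys.length ≤ n := by
        have h1 : (zs.dropWhile (fun y => y == cd)).length ≤ zs.length :=
          List.length_dropWhile_le _ _
        rw [hdrop] at h1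
        simp only [List.length_cons] at h1
        omega
      have hstep : stepA (ld, lc, cd, cc + ((zs.takeWhile (fun y => y == cd)).length : Int)) y
          = (if cc + ((zs.takeWhile (fun y => y == cd)).length : Int) > lc
              then (cd, cc + ((zs.takeWhile (fun y => y == cd)).length : Int), y, 1)
              else (ld, lc, y, 1)) := by
        simp only [stepA, hy]
        split_ifs <;> simp_all
      rw [habs]
      simp only [List.foldl_cons, hstep]
      rw [pyRuns_cons,
        show ((ys.takeWhile (fun z => z == y)).length : Int) + 1
            = 1 + ((ys.takeWhile (fun z => z == y)).length : Int) from by ring]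
      simp only [pickMax]
      by_cases hC : cc + ((zs.takeWhile (fun y => y == cd)).length : Int) > lc
      · simp only [if_pos hC]
        exact ih ys hlen cd (cc + ((zs.takeWhile (fun y => y == cd)).length : Int)) y 1
      · simp only [if_neg hC]
        exact ih ys hlen ld lc y 1

-- folding pickMax from (x,1) over a list headed by (x,k) with k ≥ 1 starts at (x,k)
lemma pickMax_first (x k : Int) (rs : List (Int × Int)) (hk : 1 ≤ k) :
    pickMax (x, 1) ((x, k) :: rs) = pickMax (x, k) rs := by
  simp only [pickMax]
  rcases lt_or_eq_of_le hk with h | h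
  · rw [if_pos (by simpa using h)]
  · rw [if_neg (by simp [← h])]
    rw [← h]

-- ===== VERDICT (by name: the statement is the Claim_ definition above) =====
theorem f_spec : Claim_equal_f := by
  intro dice _ hpre
  unfold Spec_f
  match dice with
  | [] => exact absurd rfl hpre
  | d0 :: rest =>
    show (let s := rest.foldl stepA (d0, 1, d0, 1)
          if s.2.2.2 > s.2.1 then s.2.2.1 else s.1) = f_alt (d0 :: rest)
    rw [loopA_spec rest.length rest le_rfl d0 1 d0 1]
    unfold f_alt
    rw [pyRuns_cons]
    rw [show (1 : Int) + ((rest.takeWhile (fun y => y == d0)).length : Int)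
        = ((rest.takeWhile (fun y => y == d0)).length : Int) + 1 by ring]
    rw [pickMax_first _ _ _ (by omega)]
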